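-- pv_equiv track=rewrite | github.com/hcovlab/ViralNGSBenchmarking | scripts/changeToNbases.py | ambiguous_bases
-- ===== SOURCE A (Python) =====
-- def ambiguous_bases(sequence:str):
--     changed_genome=""
--     for base in list(sequence[0].values())[0]:
--         if base not in 'actgnACTGN':
--             changed_genome+='N'
--         else:
--             changed_genome+=base
--     return changed_genome
-- ===== SOURCE B (Python) =====
-- import re
--
-- _BAD = re.compile(r'[^actgnACTGN]')
--
-- def ambiguous_bases(sequence):
--     seq = next(iter(sequence[0].values()))
--     return _BAD.sub('N', seq)
-- ===== Notes on version B (the rewrite author's own statement) =====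
-- stated objective: idiomatic
-- what changed: The explicit character loop that grows the result by string concatenation is replaced by a single compiled-regex substitution (negated character class [^actgnACTGN]) on the value extracted via next(iter(...)); Pre_ excludes the inputs (empty list, or empty first dict) on which A raises IndexError.
import Mathlib
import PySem

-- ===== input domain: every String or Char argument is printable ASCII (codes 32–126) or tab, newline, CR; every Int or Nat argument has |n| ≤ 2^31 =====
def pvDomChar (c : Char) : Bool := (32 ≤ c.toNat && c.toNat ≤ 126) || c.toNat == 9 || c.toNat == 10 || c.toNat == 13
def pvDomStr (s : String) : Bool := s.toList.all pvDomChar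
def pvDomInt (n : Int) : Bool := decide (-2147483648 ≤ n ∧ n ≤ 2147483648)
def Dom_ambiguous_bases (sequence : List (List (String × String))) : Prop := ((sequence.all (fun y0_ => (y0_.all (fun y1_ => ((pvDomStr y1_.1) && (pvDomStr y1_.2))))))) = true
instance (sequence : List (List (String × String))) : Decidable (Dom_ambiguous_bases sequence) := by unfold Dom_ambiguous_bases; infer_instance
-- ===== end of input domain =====

-- B replaces A's accumulating character loop by one compiled-regex substitution
-- (re.sub on the negated class [^actgnACTGN]); objective: idiomatic.


-- ===== PORT A =====
-- A: seq = list(sequence[0].values())[0]; loop over its chars, += 'N' for chars not in 'actgnACTGN'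
def ambiguous_bases (sequence : List (List (String × String))) : String :=
  match sequence with
  | [] => ""                     -- sequence[0] raises IndexError: outside Pre_
  | d :: _ =>
    match (PySem.Dict.ofList d).values with
    | [] => ""                   -- [0] on empty values raises IndexError: outside Pre_
    | seq :: _ =>
      seq.toList.foldl
        (fun changed_genome base =>
          if base ∉ "actgnACTGN".toList then changed_genome.push 'N'
          else changed_genome.push base) ""

-- ===== PORT B =====
-- the regex engine's per-character test: does c match [^actgnACTGN]?
def pvBadBase (c : Char) : Bool :=
  !(c == 'a' || c == 'c' || c == 't' || c == 'g' || c == 'n' ||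
    c == 'A' || c == 'C' || c == 'T' || c == 'G' || c == 'N')

-- re.sub scanning the character stream, substituting 'N' at each match
def pvReSubN : List Char → List Char
  | [] => []
  | c :: rest => (if pvBadBase c then 'N' else c) :: pvReSubN rest

-- B: seq = next(iter(sequence[0].values())); return _BAD.sub('N', seq)
def ambiguous_bases_alt (sequence : List (List (String × String))) : String :=
  match sequence.head? with
  | none => ""                   -- IndexError in Python: outside Pre_
  | some d =>
    match ((PySem.Dict.ofList d).values).head? with
    | none => ""                 -- StopIteration in Python: outside Pre_
    | some seq => String.ofList (pvReSubN seq.toList)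

-- ===== PRECONDITION & SPEC =====
-- Pre_ excludes exactly the inputs where A raises IndexError: empty list, or first dict empty.
def Pre_ambiguous_bases (sequence : List (List (String × String))) : Prop :=
  (match sequence with | [] => false | d :: _ => !d.isEmpty) = true
instance (sequence : List (List (String × String))) : Decidable (Pre_ambiguous_bases sequence) := by
  unfold Pre_ambiguous_bases; infer_instance
def pvWitness_ambiguous_bases : (List (List (String × String))) := [[("contig1", "acX g!N")]]
def Spec_ambiguous_bases (sequence : List (List (String × String))) (out : String) : Prop := out = ambiguous_bases_alt sequence
instance (sequence : List (List (String × String))) (out : String) : Decidable (Spec_ambiguous_bases sequence out) := by unfold Spec_ambiguous_bases; infer_instance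

-- ===== CLAIM (what is proved, stated in full; the proofs are below) =====
def Claim_equal_ambiguous_bases : Prop := ∀ (sequence : List (List (String × String))), Dom_ambiguous_bases sequence → Pre_ambiguous_bases sequence → Spec_ambiguous_bases sequence (ambiguous_bases sequence)

-- ===== LEMMAS AND PROOFS =====
theorem pv_bad_iff (c : Char) : pvBadBase c = true ↔ c ∉ "actgnACTGN".toList := by
  have h : ("actgnACTGN".toList) = ['a','c','t','g','n','A','C','T','G','N'] := rfl
  rw [h]
  simp [pvBadBase, List.mem_cons]
  tauto

theorem pv_foldl_push (l : List Char) (acc : String) :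
    (l.foldl
      (fun changed_genome base =>
        if base ∉ "actgnACTGN".toList then changed_genome.push 'N'
        else changed_genome.push base) acc).toList
      = acc.toList ++ pvReSubN l := by
  induction l generalizing acc with
  | nil => simp [pvReSubN]
  | cons c t ih =>
    simp only [List.foldl_cons, pvReSubN]
    rw [ih]
    by_cases h : pvBadBase c = true
    · rw [if_pos ((pv_bad_iff c).mp h), if_pos h]
      simp
    · have h' : c ∈ "actgnACTGN".toList := by
        by_contra hc; exact h ((pv_bad_iff c).mpr hc)
      rw [if_neg (not_not_intro h'), if_neg h]
      simp

-- ===== VERDICT (by name: the statement is the Claim_ definition above) =====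
theorem ambiguous_bases_spec : Claim_equal_ambiguous_bases := by
  intro sequence _ _
  unfold Spec_ambiguous_bases ambiguous_bases ambiguous_bases_alt
  cases sequence with
  | nil => rfl
  | cons d t =>
    simp only [List.head?_cons]
    cases h : (PySem.Dict.ofList d).values with
    | nil => simp only [List.head?_nil]
    | cons seq rest =>
      simp only [List.head?_cons]
      apply String.toList_inj.mp
      rw [pv_foldl_push]
      simp
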